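-- pv_equiv track=rewrite | github.com/bbehsaz/cyclonovo_dev | utils/findchain.py | find_repeat_chains_longerThenx
-- ===== SOURCE A (Python) =====
-- def all_indices(value, qlist):
--     indices = []
--     idx = -1
--     while True:
--         try:
--             idx = qlist.index(value, idx + 1)
--             indices.append(idx)
--         except ValueError:
--             break
--     return indices
--
-- def intersect(a, b):
--     """ return the intersection of two lists """
--     return list(set(a) & set(b))
--
-- def extendChainOneStep(start_points, all_shared_values, all_xcords, all_ycords):
--     next_stepX = []
--     for ind in start_points:
--         yvalue = all_ycords[ind]
--         if yvalue in all_shared_values: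
--             next_stepX.append(yvalue)
--     return list(set(next_stepX))
--
-- def find_repeat_chains_longerThenx(offset, offset_pairs, x):
--     all_xcords = [pair[0] for pair in offset_pairs]
--     all_ycords = [pair[1] for pair in offset_pairs]
--     original_shared_values = intersect(all_xcords, all_ycords)
--     maxchain = 2
--     last_shared_values = original_shared_values[:]
--     while maxchain < x and len(last_shared_values) > 0:
--         start_points = []
--         new_shared_values = []
--         for value in last_shared_values:
--             start_points += all_indices(value, all_xcords)
--
--         new_shared_values = extendChainOneStep(start_points, original_shared_values, all_xcords, all_ycords)
--         last_shared_values = new_shared_values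
--         if len(new_shared_values) > 0:
--             maxchain += 1
--         else:
--             break
--     if maxchain == x:
--         return 1
--     else:
--         return 0
-- ===== SOURCE B (Python) =====
-- def find_repeat_chains_longerThenx(offset, offset_pairs, x):
--     if x < 2:
--         return 0
--     if x == 2:
--         return 1
--     xs = {p[0] for p in offset_pairs}
--     shared = xs & {p[1] for p in offset_pairs}
--     edges = [(a, b) for (a, b) in offset_pairs if b in shared]
--     cur = shared
--     for _ in range(x - 2):
--         cur = {b for (a, b) in edges if a in cur}
--         if not cur:
--             return 0
--     return 1
-- ===== Notes on version B (the rewrite author's own statement) =====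
-- stated objective: faster
-- what changed: B precomputes the shared-value set and the edge list once and advances a frontier set by one filtered pass per iteration, instead of A's per-iteration repeated list.index scans (all_indices) over all x-coordinates for every shared value.
import Mathlib
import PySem

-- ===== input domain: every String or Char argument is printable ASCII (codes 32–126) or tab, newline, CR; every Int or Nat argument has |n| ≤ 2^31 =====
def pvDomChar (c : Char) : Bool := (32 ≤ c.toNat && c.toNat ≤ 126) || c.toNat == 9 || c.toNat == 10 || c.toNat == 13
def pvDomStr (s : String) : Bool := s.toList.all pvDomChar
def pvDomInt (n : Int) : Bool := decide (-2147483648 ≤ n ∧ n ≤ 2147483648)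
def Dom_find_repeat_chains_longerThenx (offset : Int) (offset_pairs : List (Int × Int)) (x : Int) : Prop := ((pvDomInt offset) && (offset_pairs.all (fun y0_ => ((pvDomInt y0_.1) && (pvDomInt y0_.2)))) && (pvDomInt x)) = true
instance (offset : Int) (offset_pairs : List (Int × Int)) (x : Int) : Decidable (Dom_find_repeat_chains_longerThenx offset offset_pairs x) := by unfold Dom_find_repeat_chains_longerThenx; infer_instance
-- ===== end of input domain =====

-- B replaces A's per-iteration repeated list.index scans by a precomputed edge list and one
-- filtered pass per iteration over a frontier set (faster; same return value everywhere).

-- ===== PORT A =====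
-- all_indices: the while/try loop with qlist.index(value, idx+1) collects exactly the indices
-- of value in qlist, in increasing order; ported by hand as one structural scan (exact).
def pvAllIndices (value : Int) : List Int → Nat → List Nat
  | [], _ => []
  | q :: qs, i => if q = value then i :: pvAllIndices value qs (i + 1) else pvAllIndices value qs (i + 1)

-- extendChainOneStep: for ind in start_points, yvalue = all_ycords[ind]; collect if shared; list(set(..)).
-- all_ycords[ind] ported with pyGet? (none = IndexError branch, never reached: indices come from all_indices).
def pvExtendChainOneStep (start_points : List Nat) (all_shared_values : List Int) (all_ycords : List Int) : List Int :=
  PySem.Set.ofList (start_points.foldl (fun (acc : List Int) (ind : Nat) =>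
    match PySem.List.pyGet? all_ycords (ind : Int) with
    | some y => if y ∈ all_shared_values then acc ++ [y] else acc
    | none => acc) [])

-- the while loop; fuel = (x - maxchain).toNat encodes the 'maxchain < x' test exactly
def pvChainLoop (shared xcords ycords : List Int) : Nat → List Int → Int → Int
  | 0, _, maxchain => maxchain
  | Nat.succ n, last, maxchain =>
    if last.length > 0 then
      let starts := last.foldl (fun acc v => acc ++ pvAllIndices v xcords 0) []
      let news := pvExtendChainOneStep starts shared ycords
      if news.length > 0 then pvChainLoop shared xcords ycords n news (maxchain + 1)
      else maxchain
    else maxchain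

def find_repeat_chains_longerThenx (offset : Int) (offset_pairs : List (Int × Int)) (x : Int) : Int :=
  let all_xcords := offset_pairs.map (·.1)
  let all_ycords := offset_pairs.map (·.2)
  let original_shared_values := PySem.Set.inter (PySem.Set.ofList all_xcords) (PySem.Set.ofList all_ycords)
  let maxchain := pvChainLoop original_shared_values all_xcords all_ycords (x - 2).toNat original_shared_values 2
  if maxchain = x then 1 else 0

-- ===== PORT B =====
def pvAltStep (edges : List (Int × Int)) (cur : List Int) : List Int :=
  PySem.Set.ofList ((edges.filter (fun p => decide (p.1 ∈ cur))).map (·.2))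

def pvAltLoop (edges : List (Int × Int)) : Nat → List Int → Int
  | 0, _ => 1
  | Nat.succ n, cur =>
    let c := pvAltStep edges cur
    if c = [] then 0 else pvAltLoop edges n c

def find_repeat_chains_longerThenx_alt (offset : Int) (offset_pairs : List (Int × Int)) (x : Int) : Int :=
  if x < 2 then 0
  else if x = 2 then 1
  else
    let xs := PySem.Set.ofList (offset_pairs.map (·.1))
    let shared := PySem.Set.inter xs (PySem.Set.ofList (offset_pairs.map (·.2)))
    let edges := offset_pairs.filter (fun p => decide (p.2 ∈ shared))
    pvAltLoop edges (x - 2).toNat shared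

-- ===== PRECONDITION & SPEC =====
def Spec_find_repeat_chains_longerThenx (offset : Int) (offset_pairs : List (Int × Int)) (x : Int) (out : Int) : Prop := out = find_repeat_chains_longerThenx_alt offset offset_pairs x
instance (offset : Int) (offset_pairs : List (Int × Int)) (x : Int) (out : Int) : Decidable (Spec_find_repeat_chains_longerThenx offset offset_pairs x out) := by unfold Spec_find_repeat_chains_longerThenx; infer_instance

-- ===== CLAIM (what is proved, stated in full; the proofs are below) =====
def Claim_equal_find_repeat_chains_longerThenx : Prop := ∀ (offset : Int) (offset_pairs : List (Int × Int)) (x : Int), Dom_find_repeat_chains_longerThenx offset offset_pairs x → Spec_find_repeat_chains_longerThenx offset offset_pairs x (find_repeat_chains_longerThenx offset offset_pairs x)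

-- ===== LEMMAS AND PROOFS =====

theorem pv_mem_allIndices (v : Int) (qs : List Int) : ∀ (s : Nat) (i : Nat),
    i ∈ pvAllIndices v qs s ↔ ∃ j : Nat, ∃ h : j < qs.length, qs[j] = v ∧ i = s + j := by
  induction qs with
  | nil => intro s i; simp [pvAllIndices]
  | cons q qs ih =>
    intro s i
    simp only [pvAllIndices]
    by_cases hq : q = v
    · simp only [if_pos hq, List.mem_cons, ih (s + 1) i]
      constructor
      · rintro (rfl | ⟨j, hj, hv, rfl⟩)
        · exact ⟨0, by simp, by simpa using hq, by omega⟩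
        · exact ⟨j + 1, by simpa using hj, by simpa using hv, by omega⟩
      · rintro ⟨j, hj, hv, rfl⟩
        cases j with
        | zero => left; omega
        | succ j => right; exact ⟨j, by simpa using hj, by simpa using hv, by omega⟩
    · simp only [if_neg hq, ih (s + 1) i]
      constructor
      · rintro ⟨j, hj, hv, rfl⟩
        exact ⟨j + 1, by simpa using hj, by simpa using hv, by omega⟩
      · rintro ⟨j, hj, hv, rfl⟩
        cases j with
        | zero => exact absurd (by simpa using hv) hq
        | succ j => exact ⟨j, by simpa using hj, by simpa using hv, by omega⟩

theorem pv_mem_extend (shared ycords : List Int) (starts : List Nat) (y : Int) :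
    y ∈ pvExtendChainOneStep starts shared ycords ↔
      ∃ i ∈ starts, PySem.List.pyGet? ycords (i : Int) = some y ∧ y ∈ shared := by
  unfold pvExtendChainOneStep
  rw [PySem.Set.mem_ofList]
  suffices h : ∀ (acc : List Int),
      y ∈ starts.foldl (fun (acc : List Int) (ind : Nat) =>
        match PySem.List.pyGet? ycords (ind : Int) with
        | some yv => if yv ∈ shared then acc ++ [yv] else acc
        | none => acc) acc ↔
      y ∈ acc ∨ ∃ i ∈ starts, PySem.List.pyGet? ycords (i : Int) = some y ∧ y ∈ shared by
    rw [h []]; simp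
  induction starts with
  | nil => intro acc; simp
  | cons i is ih =>
    intro acc
    simp only [List.foldl_cons]
    rcases hg : PySem.List.pyGet? ycords (i : Int) with _ | yv
    · simp only [ih]
      constructor
      · rintro (h | ⟨j, hj, hv⟩)
        · exact Or.inl h
        · exact Or.inr ⟨j, List.mem_cons_of_mem _ hj, hv⟩
      · rintro (h | ⟨j, hj, hv⟩)
        · exact Or.inl h
        · rcases List.mem_cons.mp hj with rfl | hj
          · rw [hg] at hv; exact absurd hv.1 (by simp)
          · exact Or.inr ⟨j, hj, hv⟩
    · by_cases hs : yv ∈ shared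
      · simp only [if_pos hs, ih, List.mem_append, List.mem_singleton]
        constructor
        · rintro ((h | rfl) | ⟨j, hj, hv⟩)
          · exact Or.inl h
          · exact Or.inr ⟨i, List.mem_cons_self, hg, hs⟩
          · exact Or.inr ⟨j, List.mem_cons_of_mem _ hj, hv⟩
        · rintro (h | ⟨j, hj, hv⟩)
          · exact Or.inl (Or.inl h)
          · rcases List.mem_cons.mp hj with rfl | hj
            · rw [hg] at hv; exact Or.inl (Or.inr (by simpa using hv.1.symm))
            · exact Or.inr ⟨j, hj, hv⟩
      · simp only [if_neg hs, ih]
        constructor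
        · rintro (h | ⟨j, hj, hv⟩)
          · exact Or.inl h
          · exact Or.inr ⟨j, List.mem_cons_of_mem _ hj, hv⟩
        · rintro (h | ⟨j, hj, hv⟩)
          · exact Or.inl h
          · rcases List.mem_cons.mp hj with rfl | hj
            · rw [hg] at hv; cases hv.1; exact absurd hv.2 hs
            · exact Or.inr ⟨j, hj, hv⟩

theorem pv_mem_altStep (edges : List (Int × Int)) (cur : List Int) (y : Int) :
    y ∈ pvAltStep edges cur ↔ ∃ p ∈ edges, p.1 ∈ cur ∧ p.2 = y := by
  unfold pvAltStep
  rw [PySem.Set.mem_ofList]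
  simp only [List.mem_map, List.mem_filter, decide_eq_true_eq]
  constructor
  · rintro ⟨p, ⟨hp, hc⟩, rfl⟩; exact ⟨p, hp, hc, rfl⟩
  · rintro ⟨p, hp, hc, rfl⟩; exact ⟨p, ⟨hp, hc⟩, rfl⟩

-- the two step functions produce the same SET of values from frontiers with the same members
theorem pv_step_equiv (pairs : List (Int × Int)) (shared last cur : List Int)
    (hinv : ∀ v, v ∈ last ↔ v ∈ cur) (y : Int) :
    y ∈ pvExtendChainOneStep
          (last.foldl (fun acc v => acc ++ pvAllIndices v (pairs.map (·.1)) 0) [])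
          shared (pairs.map (·.2)) ↔
      y ∈ pvAltStep (pairs.filter (fun p => decide (p.2 ∈ shared))) cur := by
  rw [pv_mem_extend, pv_mem_altStep]
  have hstarts : ∀ i : Nat,
      i ∈ last.foldl (fun acc v => acc ++ pvAllIndices v (pairs.map (·.1)) 0) [] ↔
        ∃ v ∈ last, i ∈ pvAllIndices v (pairs.map (·.1)) 0 := by
    intro i
    rw [PySem.List.foldl_append_eq_flatMap]
    simp [List.mem_flatMap]
  constructor
  · rintro ⟨i, hi, hget, hsh⟩
    rcases (hstarts i).mp hi with ⟨v, hv, hia⟩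
    rcases (pv_mem_allIndices v (pairs.map (·.1)) 0 i).mp hia with ⟨j, hj, hxv, rfl⟩
    have hjp : j < pairs.length := by simpa using hj
    rw [Nat.zero_add] at hget
    rw [PySem.List.pyGet?_natCast] at hget
    obtain ⟨hlt, hval⟩ := List.getElem?_eq_some_iff.mp hget
    have hy : pairs[j].2 = y := by simpa using hval
    refine ⟨pairs[j], List.mem_filter.mpr ⟨List.getElem_mem hjp,
      by simp only [decide_eq_true_eq, hy]; exact hsh⟩, ?_, hy⟩
    have hx1 : pairs[j].1 = v := by simpa using hxv
    rw [hx1]; exact (hinv v).mp hv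
  · rintro ⟨p, hp, hc, rfl⟩
    rcases List.mem_filter.mp hp with ⟨hpm, hpsh⟩
    rcases List.mem_iff_getElem.mp hpm with ⟨j, hj, rfl⟩
    have hsh : pairs[j].2 ∈ shared := of_decide_eq_true hpsh
    refine ⟨j, (hstarts j).mpr ⟨pairs[j].1, (hinv _).mpr hc, ?_⟩, ?_, hsh⟩
    · exact (pv_mem_allIndices _ _ 0 j).mpr ⟨j, by simpa using hj, by simp, by omega⟩
    · rw [PySem.List.pyGet?_natCast]
      simp [hj]

theorem pv_loop_eq (pairs : List (Int × Int)) (shared : List Int) :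
    ∀ (n : Nat) (m : Int) (last cur : List Int), (∀ v, v ∈ last ↔ v ∈ cur) →
      (if pvChainLoop shared (pairs.map (·.1)) (pairs.map (·.2)) n last m = m + n then (1 : Int) else 0) =
        pvAltLoop (pairs.filter (fun p => decide (p.2 ∈ shared))) n cur := by
  intro n
  induction n with
  | zero => intro m last cur _; simp [pvChainLoop, pvAltLoop]
  | succ n ih =>
    intro m last cur hinv
    have hstep := pv_step_equiv pairs shared last cur hinv
    have hm : m ≠ m + ((n : Int) + 1) := by omega
    simp only [pvChainLoop, pvAltLoop]
    by_cases hlast : last = []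
    · have hcur : cur = [] := List.eq_nil_iff_forall_not_mem.mpr
        (fun v hv => List.eq_nil_iff_forall_not_mem.mp hlast v ((hinv v).mpr hv))
      have hcnil : pvAltStep (pairs.filter (fun p => decide (p.2 ∈ shared))) cur = [] := by
        rw [hcur]; simp [pvAltStep]
      rw [if_neg (by simp [hlast] : ¬ last.length > 0), if_pos hcnil]
      push_cast
      rw [if_neg hm]
    · have hlen : last.length > 0 := List.length_pos_iff.mpr hlast
      rw [if_pos hlen]
      by_cases hne : pvExtendChainOneStep
          (last.foldl (fun acc v => acc ++ pvAllIndices v (pairs.map (·.1)) 0) [])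
          shared (pairs.map (·.2)) = []
      · have hcnil : pvAltStep (pairs.filter (fun p => decide (p.2 ∈ shared))) cur = [] :=
          List.eq_nil_iff_forall_not_mem.mpr
            (fun v hv => List.eq_nil_iff_forall_not_mem.mp hne v ((hstep v).mpr hv))
        have hlen0 : ¬ (pvExtendChainOneStep
            (last.foldl (fun acc v => acc ++ pvAllIndices v (pairs.map (·.1)) 0) [])
            shared (pairs.map (·.2))).length > 0 := by rw [hne]; simp
        rw [if_neg hlen0, if_pos hcnil]
        push_cast
        rw [if_neg hm]
      · have hcne : pvAltStep (pairs.filter (fun p => decide (p.2 ∈ shared))) cur ≠ [] := by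
          intro h
          rcases List.exists_mem_of_ne_nil _ hne with ⟨v, hv⟩
          exact List.eq_nil_iff_forall_not_mem.mp h v ((hstep v).mp hv)
        have hnlen : (pvExtendChainOneStep
            (last.foldl (fun acc v => acc ++ pvAllIndices v (pairs.map (·.1)) 0) [])
            shared (pairs.map (·.2))).length > 0 := List.length_pos_iff.mpr hne
        rw [if_pos hnlen, if_neg hcne]
        have h2 : m + (((n : Nat) + 1 : Nat) : Int) = m + 1 + (n : Int) := by push_cast; ring
        rw [h2]
        exact ih (m + 1) _ _ hstep

-- ===== VERDICT (by name: the statement is the Claim_ definition above) =====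
theorem find_repeat_chains_longerThenx_spec : Claim_equal_find_repeat_chains_longerThenx := by
  intro offset pairs x _
  unfold Spec_find_repeat_chains_longerThenx
  simp only [find_repeat_chains_longerThenx, find_repeat_chains_longerThenx_alt]
  by_cases hx2 : x < 2
  · rw [if_pos hx2]
    have ht : (x - 2).toNat = 0 := by omega
    rw [ht]
    simp only [pvChainLoop]
    rw [if_neg (by omega : ¬ (2 : Int) = x)]
  · rw [if_neg hx2]
    by_cases hx : x = 2
    · rw [if_pos hx]
      subst hx
      simp [pvChainLoop]
    · rw [if_neg hx]
      have h := pv_loop_eq pairs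
        (PySem.Set.inter (PySem.Set.ofList (pairs.map (·.1))) (PySem.Set.ofList (pairs.map (·.2))))
        (x - 2).toNat 2
        (PySem.Set.inter (PySem.Set.ofList (pairs.map (·.1))) (PySem.Set.ofList (pairs.map (·.2))))
        (PySem.Set.inter (PySem.Set.ofList (pairs.map (·.1))) (PySem.Set.ofList (pairs.map (·.2))))
        (fun v => Iff.rfl)
      have hn : (2 : Int) + ((x - 2).toNat : Int) = x := by omega
      rw [hn] at h
      exact h
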